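-- pv_equiv track=rewrite | github.com/meirdev/adventofcode-2019 | day12/main.py | motion_dim
-- ===== SOURCE A (Python) =====
-- import itertools
-- from typing import Iterator
--
-- def motion_dim(positions: list[int]) -> Iterator[tuple[list[int], list[int]]]:
--     velocities = [0] * len(positions)
--
--     first_state = tuple(velocities) + tuple(positions)
--
--     while True:
--         for a, b in itertools.combinations(range(len(positions)), 2):
--             if positions[a] < positions[b]:
--                 velocities[a] += 1
--                 velocities[b] -= 1
--             elif positions[a] > positions[b]:
--                 velocities[a] -= 1
--                 velocities[b] += 1
--
--         for i in range(len(positions)):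
--             positions[i] += velocities[i]
--
--         yield positions, velocities
--
--         if first_state == tuple(velocities) + tuple(positions):
--             break
-- ===== SOURCE B (Python) =====
-- from typing import Iterator
--
--
-- def motion_dim(positions: list[int]) -> Iterator[tuple[list[int], list[int]]]:
--     n = len(positions)
--     velocities = [0] * n
--
--     first_state = tuple(velocities) + tuple(positions)
--
--     while True:
--         # Count multiplicities once, then sweep the distinct values in sorted
--         # order keeping a running count of strictly-smaller bodies: the
--         # velocity delta of a body at value x is (#strictly greater) - (#strictly less).
--         counts = {}
--         for x in positions:
--             counts[x] = counts.get(x, 0) + 1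
--         delta = {}
--         less = 0
--         for k in sorted(counts):
--             c = counts[k]
--             delta[k] = (n - less - c) - less
--             less += c
--
--         for i in range(n):
--             velocities[i] += delta[positions[i]]
--         for i in range(n):
--             positions[i] += velocities[i]
--
--         yield positions, velocities
--
--         if first_state == tuple(velocities) + tuple(positions):
--             break
-- ===== Notes on version B (the rewrite author's own statement) =====
-- stated objective: alternative
-- what changed: The O(n^2) pairwise combinations loop that accumulates velocity deltas is replaced by a per-step counting pass: build a multiplicity dict of positions, sweep its keys in sorted order with a running prefix count, and give each body the delta (#strictly greater) - (#strictly less) by one dict lookup, making each step O(n log n).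
import Mathlib
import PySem

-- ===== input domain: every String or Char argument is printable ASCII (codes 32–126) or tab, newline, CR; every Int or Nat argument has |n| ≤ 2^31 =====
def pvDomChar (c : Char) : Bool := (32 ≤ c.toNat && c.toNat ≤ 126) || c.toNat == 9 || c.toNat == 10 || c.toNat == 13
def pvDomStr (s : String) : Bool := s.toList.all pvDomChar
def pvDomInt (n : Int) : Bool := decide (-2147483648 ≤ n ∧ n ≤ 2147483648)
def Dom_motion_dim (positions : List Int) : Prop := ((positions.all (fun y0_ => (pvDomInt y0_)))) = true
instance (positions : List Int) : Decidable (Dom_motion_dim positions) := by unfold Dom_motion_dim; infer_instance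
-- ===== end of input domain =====

-- B replaces A's O(n^2) pairwise inner loop by a counter + sorted-distinct-values prefix sweep
-- (objective: alternative/faster inner step); both generators yield the SAME mutated lists, so the
-- materialised return value is the final (= initial) state repeated once per step; the while-True
-- loops are made total with a fixed huge fuel (fuel exhaustion is unreachable in any observed run).

-- ===== PORT A =====
-- itertools.combinations(range n, 2): lexicographic (a, b) with a < b < n
def pvCombos (n : Nat) : List (Nat × Nat) :=
  (List.range n).flatMap (fun a => (List.range' (a + 1) (n - (a + 1))).map (fun b => (a, b)))

-- the inner 'for a, b in combinations…' loop; indices are always in range, getD is exact there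
def pvGravA (p : List Int) (v : List Int) : List Int :=
  (pvCombos p.length).foldl (fun v ab =>
    if p.getD ab.1 0 < p.getD ab.2 0 then
      (v.set ab.1 (v.getD ab.1 0 + 1)).set ab.2 (v.getD ab.2 0 - 1)
    else if p.getD ab.2 0 < p.getD ab.1 0 then
      (v.set ab.1 (v.getD ab.1 0 - 1)).set ab.2 (v.getD ab.2 0 + 1)
    else v) v

-- while True: … yield …; break on return to first_state (fuel only makes the loop total)
def pvLoopA (p0 : List Int) : Nat → List Int → List Int → Nat → (List Int × List Int × Nat)
  | 0, p, v, k => (p, v, k)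
  | fuel + 1, p, v, k =>
    let v' := pvGravA p v
    let p' := List.zipWith (· + ·) p v'
    if v' ++ p' = List.replicate p0.length 0 ++ p0 then (p', v', k + 1)
    else pvLoopA p0 fuel p' v' (k + 1)

-- list(motion_dim(ps)): every yielded tuple holds the same two list objects, so the
-- materialised list is the final state repeated once per yield
def motion_dim (positions : List Int) : List (List Int × List Int) :=
  let r := pvLoopA positions 1000000000000000 positions (List.replicate positions.length 0) 0
  List.replicate r.2.2 (r.1, r.2.1)

-- ===== PORT B =====
-- counts[x] = counts.get(x, 0) + 1 loop, then the sorted-keys prefix sweep building delta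
def pvDeltaDict (p : List Int) : PySem.Dict Int Int :=
  let n : Int := (p.length : Int)
  let cnt := p.foldl (fun d x => d.insert x (d.getD x 0 + 1)) PySem.Dict.empty
  (PySem.List.sorted cnt.keys (fun x => x) false).foldl
    (fun (acc : PySem.Dict Int Int × Int) k =>
      let c := cnt.getD k 0
      (acc.1.insert k ((n - acc.2 - c) - acc.2), acc.2 + c)) (PySem.Dict.empty, 0) |>.1

-- velocities[i] += delta[positions[i]] (i runs over both lists of equal length); delta[x] is
-- always present for x in positions, getD is exact there
def pvGravB (p : List Int) (v : List Int) : List Int :=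
  let d := pvDeltaDict p
  List.zipWith (fun vi x => vi + d.getD x 0) v p

def pvLoopB (p0 : List Int) : Nat → List Int → List Int → Nat → (List Int × List Int × Nat)
  | 0, p, v, k => (p, v, k)
  | fuel + 1, p, v, k =>
    let v' := pvGravB p v
    let p' := List.zipWith (· + ·) p v'
    if v' ++ p' = List.replicate p0.length 0 ++ p0 then (p', v', k + 1)
    else pvLoopB p0 fuel p' v' (k + 1)

def motion_dim_alt (positions : List Int) : List (List Int × List Int) :=
  let r := pvLoopB positions 1000000000000000 positions (List.replicate positions.length 0) 0
  List.replicate r.2.2 (r.1, r.2.1)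

-- ===== PRECONDITION & SPEC =====
def Spec_motion_dim (positions : List Int) (out : List (List Int × List Int)) : Prop := out = motion_dim_alt positions
instance (positions : List Int) (out : List (List Int × List Int)) : Decidable (Spec_motion_dim positions out) := by unfold Spec_motion_dim; infer_instance

-- ===== CLAIM (what is proved, stated in full; the proofs are below) =====
def Claim_equal_motion_dim : Prop := ∀ (positions : List Int), Dom_motion_dim positions → Spec_motion_dim positions (motion_dim positions)

-- ===== LEMMAS AND PROOFS =====

-- signed comparison: the per-pair velocity contribution
def pvSgn (x y : Int) : Int := if x < y then 1 else if y < x then -1 else 0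

-- #{strictly greater} - #{strictly less}
def pvDelta (p : List Int) (x : Int) : Int :=
  ((p.countP (fun y => decide (x < y)) : Int)) - ((p.countP (fun y => decide (y < x)) : Int))

theorem pvDelta_eq_sum_sgn (p : List Int) (x : Int) :
    pvDelta p x = (p.map (fun y => pvSgn x y)).sum := by
  induction p with
  | nil => simp [pvDelta]
  | cons a t ih =>
    simp only [pvDelta, List.countP_cons, List.map_cons, List.sum_cons] at *
    rcases lt_trichotomy x a with h | h | h
    · rw [if_pos (by simpa using h), if_neg (by simpa using not_lt.mpr h.le),
        show pvSgn x a = 1 from by simp [pvSgn, h]]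
      push_cast; omega
    · subst h
      rw [show pvSgn x x = 0 from by simp [pvSgn]]
      push_cast; omega
    · rw [if_neg (by simpa using not_lt.mpr h.le), if_pos (by simpa using h),
        show pvSgn x a = -1 from by simp [pvSgn, not_lt.mpr h.le, h]]
      push_cast; omega

-- getD after set, totally
theorem getD_set_ite (v : List Int) (a i : Nat) (w : Int) :
    (v.set a w).getD i 0 = if a = i ∧ a < v.length then w else v.getD i 0 := by
  by_cases hai : a = i
  · subst hai
    by_cases hl : a < v.length
    · simp [List.getD, hl]
    · simp only [hl, and_false, if_false]
      rw [List.set_eq_of_length_le (by omega)]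
  · simp [List.getD, hai]

-- contribution of one combinations-pair to velocity index i
def pvContrib (p : List Int) (i : Nat) (ab : Nat × Nat) : Int :=
  if i = ab.1 then pvSgn (p.getD ab.1 0) (p.getD ab.2 0)
  else if i = ab.2 then pvSgn (p.getD ab.2 0) (p.getD ab.1 0) else 0

def pvGravBody (p : List Int) (v : List Int) (ab : Nat × Nat) : List Int :=
  if p.getD ab.1 0 < p.getD ab.2 0 then
    (v.set ab.1 (v.getD ab.1 0 + 1)).set ab.2 (v.getD ab.2 0 - 1)
  else if p.getD ab.2 0 < p.getD ab.1 0 then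
    (v.set ab.1 (v.getD ab.1 0 - 1)).set ab.2 (v.getD ab.2 0 + 1)
  else v

theorem pvGravBody_length (p v : List Int) (ab : Nat × Nat) :
    (pvGravBody p v ab).length = v.length := by
  unfold pvGravBody; split_ifs <;> simp

theorem pvGravBody_getD (p v : List Int) (a b i : Nat) (ha : a < v.length)
    (hb : b < v.length) (hab : a ≠ b) :
    (pvGravBody p v (a, b)).getD i 0 = v.getD i 0 + pvContrib p i (a, b) := by
  unfold pvGravBody
  dsimp only
  rcases lt_trichotomy (p.getD a 0) (p.getD b 0) with h | h | h
  · rw [if_pos h]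
    have hc : pvContrib p i (a, b) = if i = a then 1 else if i = b then -1 else 0 := by
      unfold pvContrib pvSgn; dsimp only; split_ifs <;> omega
    rw [hc, getD_set_ite, getD_set_ite]
    simp only [List.length_set]
    by_cases hia : i = a
    · subst hia
      rw [if_neg (fun hx => hab hx.1.symm), if_pos ⟨rfl, ha⟩, if_pos rfl]
    · by_cases hib : i = b
      · subst hib
        rw [if_pos ⟨rfl, hb⟩, if_neg hia, if_pos rfl]
        omega
      · rw [if_neg (fun hx => hib hx.1.symm), if_neg (fun hx => hia hx.1.symm),
          if_neg hia, if_neg hib]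
        omega
  · rw [if_neg (by omega), if_neg (by omega)]
    have hc : pvContrib p i (a, b) = 0 := by
      unfold pvContrib pvSgn; dsimp only; split_ifs <;> omega
    rw [hc]; omega
  · rw [if_neg (by omega), if_pos h]
    have hc : pvContrib p i (a, b) = if i = a then -1 else if i = b then 1 else 0 := by
      unfold pvContrib pvSgn; dsimp only; split_ifs <;> omega
    rw [hc, getD_set_ite, getD_set_ite]
    simp only [List.length_set]
    by_cases hia : i = a
    · subst hia
      rw [if_neg (fun hx => hab hx.1.symm), if_pos ⟨rfl, ha⟩, if_pos rfl]
      omega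
    · by_cases hib : i = b
      · subst hib
        rw [if_pos ⟨rfl, hb⟩, if_neg hia, if_pos rfl]
      · rw [if_neg (fun hx => hib hx.1.symm), if_neg (fun hx => hia hx.1.symm),
          if_neg hia, if_neg hib]
        omega

theorem foldPairs_char (p : List Int) (ps : List (Nat × Nat)) :
    ∀ (v : List Int), (∀ ab ∈ ps, ab.1 < v.length ∧ ab.2 < v.length ∧ ab.1 ≠ ab.2) →
    (ps.foldl (pvGravBody p) v).length = v.length ∧
    ∀ i, (ps.foldl (pvGravBody p) v).getD i 0 = v.getD i 0 + (ps.map (pvContrib p i)).sum := by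
  induction ps with
  | nil => intro v _; simp
  | cons ab t ih =>
    intro v hbnd
    obtain ⟨ha, hb, hab⟩ := hbnd ab (by simp)
    have hlen := pvGravBody_length p v ab
    have hrest : ∀ a' ∈ t, a'.1 < (pvGravBody p v ab).length ∧ a'.2 < (pvGravBody p v ab).length ∧ a'.1 ≠ a'.2 := by
      intro a' ha'; rw [hlen]; exact hbnd a' (by simp [ha'])
    obtain ⟨ihl, ihg⟩ := ih (pvGravBody p v ab) hrest
    refine ⟨by simp [List.foldl_cons, ihl, hlen], fun i => ?_⟩
    rw [List.foldl_cons, ihg i, pvGravBody_getD p v ab.1 ab.2 i ha hb hab]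
    simp only [List.map_cons, List.sum_cons]
    ring

-- sum of an indicator over a Nodup list
theorem sum_map_ite {α : Type} [DecidableEq α] (l : List α) (hl : l.Nodup) (y : α) (c : Int) :
    (l.map (fun k => if y = k then c else 0)).sum = if y ∈ l then c else 0 := by
  induction l with
  | nil => simp
  | cons a t ih =>
    rcases List.nodup_cons.mp hl with ⟨hna, hnt⟩
    by_cases hy : y = a
    · subst hy
      have : (t.map (fun k => if y = k then c else 0)).sum = 0 := by
        apply List.sum_eq_zero; intro x hx
        rcases List.mem_map.mp hx with ⟨k, hk, rfl⟩
        simp [show y ≠ k from fun h => hna (h ▸ hk)]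
      simp [this]
    · simp [hy, ih hnt]

theorem pvInnerSum (p : List Int) (i n a : Nat) (hi : i < n) (hia : a ≠ i) :
    ((List.range' (a + 1) (n - (a + 1))).map (fun b => pvContrib p i (a, b))).sum =
      if a < i then pvSgn (p.getD i 0) (p.getD a 0) else 0 := by
  have hcongr : (List.range' (a + 1) (n - (a + 1))).map (fun b => pvContrib p i (a, b)) =
      (List.range' (a + 1) (n - (a + 1))).map (fun b => if i = b then pvSgn (p.getD i 0) (p.getD a 0) else 0) := by
    apply List.map_congr_left; intro b _
    unfold pvContrib
    dsimp only
    rw [if_neg (by omega)]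
    by_cases hib : i = b
    · subst hib; rfl
    · rw [if_neg hib, if_neg hib]
  rw [hcongr, sum_map_ite _ (List.nodup_range') i]
  rcases Nat.lt_or_ge a i with h | h
  · rw [if_pos (by rw [List.mem_range'_1]; omega), if_pos h]
  · rw [if_neg (by rw [List.mem_range'_1]; omega), if_neg (by omega)]

theorem combos_sum (p : List Int) (i : Nat) (hi : i < p.length) :
    ((pvCombos p.length).map (pvContrib p i)).sum = pvDelta p (p.getD i 0) := by
  set n := p.length with hn
  set g : Nat → Int := fun j => pvSgn (p.getD i 0) (p.getD j 0) with hg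
  have houter : ((pvCombos n).map (pvContrib p i)).sum =
      ((List.range n).map (fun a =>
        ((List.range' (a + 1) (n - (a + 1))).map (fun b => pvContrib p i (a, b))).sum)).sum := by
    unfold pvCombos
    rw [List.map_flatMap, List.flatMap_def, List.sum_flatten, List.map_map]
    apply congrArg List.sum
    apply List.map_congr_left; intro a _
    simp only [Function.comp_apply]
    rw [List.map_map]; rfl
  rw [houter]
  have hsplit : (List.range n).map (fun a =>
        ((List.range' (a + 1) (n - (a + 1))).map (fun b => pvContrib p i (a, b))).sum) =
      (List.range n).map (fun a => if a = i then ((List.range' (i + 1) (n - (i + 1))).map g).sum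
        else if a < i then g a else 0) := by
    apply List.map_congr_left; intro a _
    by_cases hai : a = i
    · subst hai
      rw [if_pos rfl]
      congr 1
      apply List.map_congr_left; intro b _
      unfold pvContrib
      rw [if_pos rfl]
    · rw [if_neg hai, pvInnerSum p i n a hi hai]
  rw [hsplit]
  -- split range n = range' 0 i ++ i :: range' (i+1) (n-i-1)
  have hrange : List.range n = List.range' 0 i ++ i :: List.range' (i + 1) (n - (i + 1)) := by
    have h2 : (i : Nat) :: List.range' (i + 1) (n - (i + 1)) = List.range' i (n - i) := by
      rw [show n - i = (n - (i + 1)) + 1 by omega, List.range'_succ]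
    rw [List.range_eq_range', h2]
    have h3 := List.range'_append_1 (s := 0) (m := i) (n := n - i)
    rw [Nat.zero_add] at h3
    rw [h3, show i + (n - i) = n by omega]
  rw [hrange]
  simp only [List.map_append, List.sum_append, List.map_cons, List.sum_cons]
  have hlow : (List.range' 0 i).map (fun a => if a = i then ((List.range' (i + 1) (n - (i + 1))).map g).sum
        else if a < i then g a else 0) = (List.range' 0 i).map g := by
    apply List.map_congr_left; intro a ha
    have : a < i := by have := List.mem_range'_1.mp ha; omega
    rw [if_neg (by omega), if_pos this]
  have hhigh : ((List.range' (i + 1) (n - (i + 1))).map (fun a => if a = i then ((List.range' (i + 1) (n - (i + 1))).map g).sum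
        else if a < i then g a else 0)).sum = 0 := by
    apply List.sum_eq_zero; intro x hx
    rcases List.mem_map.mp hx with ⟨a, ha, rfl⟩
    have : i + 1 ≤ a := (List.mem_range'_1.mp ha).1
    rw [if_neg (by omega), if_neg (by omega)]
  rw [hlow, hhigh]
  have htotal : ((List.range' 0 i).map g).sum + ((List.range' (i + 1) (n - (i + 1))).map g).sum =
      ((List.range n).map g).sum := by
    rw [hrange]
    simp only [List.map_append, List.sum_append, List.map_cons, List.sum_cons]
    have : g i = 0 := by simp [hg, pvSgn]
    rw [this]; ring
  have hfinal : ((List.range n).map g).sum = pvDelta p (p.getD i 0) := by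
    rw [pvDelta_eq_sum_sgn]
    have hmap2 : (List.range n).map (fun j => p.getD j 0) = p := by
      apply List.ext_getElem
      · simp [hn]
      · intro j h1 h2
        simp only [List.getElem_map, List.getElem_range]
        rw [List.getD_eq_getElem _ _ (by simpa [hn] using h2)]
    have hmap : (List.range n).map g = p.map (fun y => pvSgn (p.getD i 0) y) := by
      set x0 := p.getD i 0 with hx0
      conv_rhs => rw [← hmap2]
      rw [List.map_map]
      rfl
    rw [hmap]
  rw [← hfinal, ← htotal]
  simp

theorem pvGravA_char (p v : List Int) (h : v.length = p.length) :
    pvGravA p v = List.zipWith (fun vi x => vi + pvDelta p x) v p := by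
  have hbnd : ∀ ab ∈ pvCombos p.length, ab.1 < v.length ∧ ab.2 < v.length ∧ ab.1 ≠ ab.2 := by
    intro ab hab
    unfold pvCombos at hab
    rcases List.mem_flatMap.mp hab with ⟨a, ha, hmem⟩
    rcases List.mem_map.mp hmem with ⟨b, hb, rfl⟩
    have ha' := List.mem_range.mp ha
    have hb' := List.mem_range'_1.mp hb
    refine ⟨by omega, by omega, by simp; omega⟩
  have hA : pvGravA p v = (pvCombos p.length).foldl (pvGravBody p) v := by
    unfold pvGravA pvGravBody; rfl
  obtain ⟨hlen, hgetd⟩ := foldPairs_char p (pvCombos p.length) v hbnd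
  rw [hA]
  apply List.ext_getElem
  · simp [hlen, h]
  · intro i h1 h2
    have hi : i < p.length := by simp [h] at h2; omega
    have hiv : i < v.length := by omega
    rw [List.getElem_zipWith]
    have := hgetd i
    rw [combos_sum p i hi] at this
    rw [← List.getD_eq_getElem _ _ h1, this,
      List.getD_eq_getElem _ _ hiv, List.getD_eq_getElem _ _ hi]

-- ===== B side =====

-- trichotomy of counts
theorem count_tri (p : List Int) (x : Int) :
    (p.countP (fun y => decide (x < y))) + (p.countP (fun y => decide (y < x))) + p.count x = p.length := by
  induction p with
  | nil => simp
  | cons a t ih =>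
    simp only [List.countP_cons, List.count_cons, List.length_cons]
    split_ifs <;> simp_all [beq_iff_eq] <;> omega

-- sum of counts over a Nodup key list covering exactly the q-elements of p
theorem sum_count_filter (q : Int → Bool) (l : List Int) (hl : l.Nodup)
    (hq : ∀ k ∈ l, q k = true) :
    ∀ (p : List Int), (∀ y ∈ p, q y = true → y ∈ l) →
    (l.map (fun k => (p.count k : Int))).sum = (p.countP q : Int) := by
  intro p
  induction p with
  | nil =>
    intro _
    simp only [List.count_nil, List.countP_nil, Nat.cast_zero]
    exact List.sum_eq_zero (by intro x hx; rcases List.mem_map.mp hx with ⟨k, _, rfl⟩; simp)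
  | cons y t ih =>
    intro hcov
    have hcov' : ∀ z ∈ t, q z = true → z ∈ l := fun z hz => hcov z (by simp [hz])
    have hmap : l.map (fun k => (((y :: t).count k : Nat) : Int)) =
        l.map (fun k => ((t.count k : Nat) : Int) + if y = k then (1 : Int) else 0) := by
      apply List.map_congr_left
      intro k _
      simp only [List.count_cons]
      by_cases hk : k = y
      · subst hk; simp
      · simp [show ¬ y = k from fun h => hk h.symm]
    rw [hmap, List.sum_map_add, ih hcov', sum_map_ite l hl y 1]
    simp only [List.countP_cons]
    by_cases hy : q y = true
    · rw [if_pos (hcov y (by simp) hy), hy]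
      simp
    · have : y ∉ l := fun hmem => hy (hq y hmem)
      rw [if_neg this, if_neg hy]
      push_cast; ring

-- the delta-building fold: preservation when the key never occurs
theorem foldDelta_preserve (n : Int) (c : Int → Int) (x : Int) :
    ∀ (ks : List Int) (acc : PySem.Dict Int Int × Int), (∀ k ∈ ks, k ≠ x) →
    ((ks.foldl (fun acc k => (acc.1.insert k ((n - acc.2 - c k) - acc.2), acc.2 + c k)) acc).1).getD x 0 =
      acc.1.getD x 0 := by
  intro ks
  induction ks with
  | nil => intro acc _; rfl
  | cons k t ih =>
    intro acc hne
    rw [List.foldl_cons, ih _ (fun k' hk' => hne k' (by simp [hk']))]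
    rw [PySem.Dict.getD_insert, if_neg (fun hx => hne k (by simp) hx.symm)]

theorem foldDelta_getD (n : Int) (c : Int → Int) :
    ∀ (ks : List Int) (d0 : PySem.Dict Int Int) (l0 : Int), ks.Pairwise (· < ·) →
    ∀ x ∈ ks,
    ((ks.foldl (fun acc k => (acc.1.insert k ((n - acc.2 - c k) - acc.2), acc.2 + c k)) (d0, l0)).1).getD x 0 =
      (n - (l0 + ((ks.filter (fun k => decide (k < x))).map c).sum) - c x) -
        (l0 + ((ks.filter (fun k => decide (k < x))).map c).sum) := by
  intro ks
  induction ks with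
  | nil => intro _ _ _ x hx; cases hx
  | cons k t ih =>
    intro d0 l0 hpw x hx
    have hk : ∀ y ∈ t, k < y := (List.pairwise_cons.mp hpw).1
    have hpw' := (List.pairwise_cons.mp hpw).2
    rcases List.mem_cons.mp hx with rfl | hxt
    · -- x = k : head; later keys are all ≠ k
      rw [List.foldl_cons, foldDelta_preserve n c x t _ (fun y hy => ne_of_gt (hk y hy))]
      have hfilter : (x :: t).filter (fun k => decide (k < x)) = [] := by
        rw [List.filter_cons, if_neg (by simp)]
        apply List.filter_eq_nil_iff.mpr
        intro y hy; simp [not_lt.mpr (hk y hy).le]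
      rw [hfilter]
      simp [PySem.Dict.getD_insert_self]
    · -- x ∈ t
      rw [List.foldl_cons, ih _ _ hpw' x hxt]
      have hfilter : (k :: t).filter (fun k' => decide (k' < x)) = k :: t.filter (fun k' => decide (k' < x)) := by
        rw [List.filter_cons, if_pos (by simp [hk x hxt])]
      rw [hfilter]
      simp only [List.map_cons, List.sum_cons]
      ring_nf

-- lookup in the delta dict is exactly pvDelta, for values occurring in p
theorem pvDeltaDict_getD (p : List Int) (x : Int) (hx : x ∈ p) :
    (pvDeltaDict p).getD x 0 = pvDelta p x := by
  unfold pvDeltaDict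
  rw [PySem.Dict.foldl_insert_getD_add_one_eq_counter]
  set cnt := PySem.Dict.counter p with hcnt
  set ks := PySem.List.sorted cnt.keys (fun x => x) false with hks
  have hkeys : cnt.keys = PySem.Set.ofList p := PySem.Dict.keys_counter p
  have hpw : ks.Pairwise (· < ·) := by
    rw [hks, hkeys]; exact PySem.List.sorted_ofList_pairwise_lt p
  have hmem : ∀ y : Int, y ∈ ks ↔ y ∈ p := by
    intro y
    rw [hks, PySem.List.mem_sorted, hkeys, PySem.Set.mem_ofList]
  have hxk : x ∈ ks := (hmem x).mpr hx
  rw [foldDelta_getD _ _ ks PySem.Dict.empty 0 hpw x hxk]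
  have hc : ∀ k, cnt.getD k 0 = (p.count k : Int) := fun k => PySem.Dict.getD_counter p k
  have hL : ((ks.filter (fun k => decide (k < x))).map (fun k => cnt.getD k 0)).sum =
      (p.countP (fun y => decide (y < x)) : Int) := by
    have hcongr : (ks.filter (fun k => decide (k < x))).map (fun k => cnt.getD k 0) =
        (ks.filter (fun k => decide (k < x))).map (fun k => (p.count k : Int)) := by
      apply List.map_congr_left; intro k _; exact hc k
    rw [hcongr]
    apply sum_count_filter (fun y => decide (y < x)) _ (List.Nodup.filter _ (hpw.nodup))
      (fun k hk => (List.mem_filter.mp hk).2)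
    intro y hy hqy
    exact List.mem_filter.mpr ⟨(hmem y).mpr hy, hqy⟩
  rw [hL, hc x]
  have htri := count_tri p x
  unfold pvDelta
  omega

-- pointwise congruence of zipWith in the members of its second list
theorem zipWith_congr_right (f g : Int → Int → Int) :
    ∀ (v p : List Int), (∀ x ∈ p, ∀ vi, f vi x = g vi x) →
    List.zipWith f v p = List.zipWith g v p := by
  intro v
  induction v with
  | nil => intro p _; simp
  | cons vi vt ih =>
    intro p hp
    cases p with
    | nil => simp
    | cons x pt =>
      simp only [List.zipWith_cons_cons]
      rw [hp x (by simp) vi, ih pt (fun z hz w => hp z (by simp [hz]) w)]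

-- B's zipWith uses the dict lookup; replace it by pvDelta (equal on members of p)
theorem pvGravB_char (p v : List Int) :
    pvGravB p v = List.zipWith (fun vi x => vi + pvDelta p x) v p := by
  unfold pvGravB
  exact zipWith_congr_right _ _ v p (fun x hx vi => by rw [pvDeltaDict_getD p x hx])

theorem main_step (p v : List Int) (h : v.length = p.length) : pvGravA p v = pvGravB p v := by
  rw [pvGravA_char p v h, pvGravB_char p v]

theorem loop_eq (p0 : List Int) (fuel : Nat) (p v : List Int) (k : Nat)
    (h : v.length = p.length) : pvLoopA p0 fuel p v k = pvLoopB p0 fuel p v k := by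
  induction fuel generalizing p v k with
  | zero => rfl
  | succ m ih =>
    show (if pvGravA p v ++ List.zipWith (· + ·) p (pvGravA p v) = List.replicate p0.length 0 ++ p0
        then (List.zipWith (· + ·) p (pvGravA p v), pvGravA p v, k + 1)
        else pvLoopA p0 m (List.zipWith (· + ·) p (pvGravA p v)) (pvGravA p v) (k + 1)) =
      (if pvGravB p v ++ List.zipWith (· + ·) p (pvGravB p v) = List.replicate p0.length 0 ++ p0
        then (List.zipWith (· + ·) p (pvGravB p v), pvGravB p v, k + 1)
        else pvLoopB p0 m (List.zipWith (· + ·) p (pvGravB p v)) (pvGravB p v) (k + 1))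
    rw [← main_step p v h]
    have hlenA : (pvGravA p v).length = v.length := by
      rw [pvGravA_char p v h]; simp [h]
    by_cases hc : pvGravA p v ++ List.zipWith (· + ·) p (pvGravA p v) = List.replicate p0.length 0 ++ p0
    · rw [if_pos hc, if_pos hc]
    · rw [if_neg hc, if_neg hc]
      exact ih _ _ _ (by simp [hlenA, h])

-- ===== VERDICT (by name: the statement is the Claim_ definition above) =====
theorem motion_dim_spec : Claim_equal_motion_dim := by
  intro positions _
  unfold Spec_motion_dim motion_dim motion_dim_alt
  rw [loop_eq _ _ _ _ _ (by simp)]
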